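-- pv_equiv track=rewrite | github.com/daniel-reich/ubiquitous-fiesta | yC2HzHNRymWQmCj6N_6.py | less_or_equal
-- ===== SOURCE A (Python) =====
-- def less_or_equal(lst, k):
--   if k==0 and (len(lst)>1 or lst[0]!=1):
--     return 1
--   for i in lst:
--     cur = 0
--     for j in lst:
--       if j<=i:
--         cur+=1
--     if cur==k:
--       return i
-- ===== SOURCE B (Python) =====
-- def less_or_equal(lst, k):
--     if k == 0 and (len(lst) > 1 or lst[0] != 1):
--         return 1
--     rank = {}
--     for idx, v in enumerate(sorted(lst)):
--         rank[v] = idx + 1   # last occurrence wins: rank[v] = number of elements <= v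
--     for i in lst:
--         if rank[i] == k:
--             return i
-- ===== Notes on version B (the rewrite author's own statement) =====
-- stated objective: faster
-- what changed: Replaces the quadratic count-for-every-element nested loop by sorting once and building a value->rank dictionary in one pass over the sorted list (last occurrence index + 1 = number of elements <= value), then a single scan with O(1) lookups.
-- outside the precondition, e.g. on less_or_equal([], 0): A raises IndexError, B raises IndexError
import Mathlib
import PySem

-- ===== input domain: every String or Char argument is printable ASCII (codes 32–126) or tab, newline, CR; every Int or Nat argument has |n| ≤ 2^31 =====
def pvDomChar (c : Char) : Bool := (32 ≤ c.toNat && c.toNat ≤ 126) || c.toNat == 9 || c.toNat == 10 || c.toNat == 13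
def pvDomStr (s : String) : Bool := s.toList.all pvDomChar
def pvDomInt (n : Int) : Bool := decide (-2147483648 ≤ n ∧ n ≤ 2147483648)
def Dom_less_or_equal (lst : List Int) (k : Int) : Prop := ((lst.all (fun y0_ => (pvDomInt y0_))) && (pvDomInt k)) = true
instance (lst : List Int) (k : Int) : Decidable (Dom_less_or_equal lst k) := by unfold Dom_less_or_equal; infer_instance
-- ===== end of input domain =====

-- B sorts once and builds a value->rank dictionary in one pass, replacing A's quadratic nested count loop (objective: faster).


-- ===== PORT A =====
-- outer 'for i in lst' loop of A; lst is the full list used by the inner count loop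
def pvALoop (lst : List Int) (k : Int) : List Int → Option Int
  | [] => none
  | i :: rest =>
    let cur := lst.foldl (fun cur j => if j ≤ i then cur + 1 else cur) (0 : Int)
    if cur = k then some i else pvALoop lst k rest

def less_or_equal (lst : List Int) (k : Int) : Option Int :=
  -- 'lst[0]' only evaluated when len(lst) ≤ 1; it raises on [] (excluded by Pre_)
  if k = 0 ∧ (lst.length > 1 ∨ ¬ (PySem.List.pyGet? lst 0 = some 1)) then some 1
  else pvALoop lst k lst

-- ===== PORT B =====
-- 'for idx, v in enumerate(sorted(lst)): rank[v] = idx + 1'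
def pvRank (lst : List Int) : PySem.Dict Int Int :=
  (PySem.List.enumerate (PySem.List.sorted lst (fun x => x) false) 0).foldl
    (fun d p => d.insert p.2 (p.1 + 1)) PySem.Dict.empty

-- 'for i in lst: if rank[i] == k: return i' — key i always present (i ∈ lst), so getD's default is never used
def pvBLoop (rank : PySem.Dict Int Int) (k : Int) : List Int → Option Int
  | [] => none
  | i :: rest => if rank.getD i 0 = k then some i else pvBLoop rank k rest

def less_or_equal_alt (lst : List Int) (k : Int) : Option Int :=
  if k = 0 ∧ (lst.length > 1 ∨ ¬ (PySem.List.pyGet? lst 0 = some 1)) then some 1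
  else pvBLoop (pvRank lst) k lst

-- ===== PRECONDITION & SPEC =====
-- Pre_ excludes only ([], 0), where A (and B) raise IndexError on lst[0]
def Pre_less_or_equal (lst : List Int) (k : Int) : Prop := ¬ (lst = [] ∧ k = 0)
instance (lst : List Int) (k : Int) : Decidable (Pre_less_or_equal lst k) := by unfold Pre_less_or_equal; infer_instance
def pvWitness_less_or_equal : List Int × Int := ([3, 1, 2], 2)

def Spec_less_or_equal (lst : List Int) (k : Int) (out : Option Int) : Prop := out = less_or_equal_alt lst k
instance (lst : List Int) (k : Int) (out : Option Int) : Decidable (Spec_less_or_equal lst k out) := by unfold Spec_less_or_equal; infer_instance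

-- ===== CLAIM (what is proved, stated in full; the proofs are below) =====
def Claim_equal_less_or_equal : Prop := ∀ (lst : List Int) (k : Int), Dom_less_or_equal lst k → Pre_less_or_equal lst k → Spec_less_or_equal lst k (less_or_equal lst k)

-- ===== LEMMAS AND PROOFS =====

-- A's inner count loop is countP
theorem pv_count_foldl (lst : List Int) (i : Int) (c : Int) :
    lst.foldl (fun cur j => if j ≤ i then cur + 1 else cur) c = c + (lst.countP (fun j => decide (j ≤ i)) : Int) := by
  induction lst generalizing c with
  | nil => simp
  | cons a t ih =>
    simp only [List.foldl_cons, List.countP_cons, ih]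
    by_cases h : a ≤ i
    · simp [h]; ring
    · simp [h]

-- the rank fold does not touch keys it never inserts
theorem pv_fold_notmem (s : List Int) (v : Int) (hv : v ∉ s) :
    ∀ (d : PySem.Dict Int Int) (n : Int),
    ((PySem.List.enumerate s n).foldl (fun d p => d.insert p.2 (p.1 + 1)) d).getD v 0 = d.getD v 0 := by
  induction s with
  | nil => intro d n; simp [PySem.List.enumerate]
  | cons a t ih =>
    intro d n
    simp only [List.mem_cons, not_or] at hv
    rw [PySem.List.enumerate_cons, List.foldl_cons, ih hv.2]
    exact PySem.Dict.getD_insert_of_ne _ _ _ (fun h => hv.1 h)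

-- on a sorted list, the rank of v (last index of v, +1, plus offset) is the count of elements ≤ v
theorem pv_rank_lookup (s : List Int) :
    s.Pairwise (· ≤ ·) → ∀ v ∈ s, ∀ (d : PySem.Dict Int Int) (n : Int),
    ((PySem.List.enumerate s n).foldl (fun d p => d.insert p.2 (p.1 + 1)) d).getD v 0
      = n + (s.countP (fun j => decide (j ≤ v)) : Int) := by
  induction s with
  | nil => intro _ v hv; cases hv
  | cons a t ih =>
    intro hs v hv d n
    rw [List.pairwise_cons] at hs
    rw [PySem.List.enumerate_cons, List.foldl_cons]
    by_cases hvt : v ∈ t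
    · have hav : a ≤ v := hs.1 v hvt
      rw [ih hs.2 v hvt]
      simp only [List.countP_cons, hav, decide_true]
      push_cast; ring
    · have hva : v = a := by rcases List.mem_cons.mp hv with h | h; exact h; exact absurd h hvt
      subst hva
      rw [pv_fold_notmem t v hvt, PySem.Dict.getD_insert_self]
      have ht0 : t.countP (fun j => decide (j ≤ v)) = 0 := by
        rw [List.countP_eq_zero]
        intro j hj hle
        exact hvt (by rw [show j = v from le_antisymm (of_decide_eq_true hle) (hs.1 j hj)] at hj; exact hj)
      simp [ht0]

-- for i ∈ lst, B's dictionary lookup equals A's count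
theorem pv_rank_eq_count (lst : List Int) (i : Int) (hi : i ∈ lst) :
    (pvRank lst).getD i 0 = (lst.countP (fun j => decide (j ≤ i)) : Int) := by
  unfold pvRank
  have hperm := PySem.List.sorted_perm (xs := lst) (key := fun x => x) (rev := false)
  rw [pv_rank_lookup _ (PySem.List.sorted_pairwise (xs := lst) (key := fun x => x)) i
      ((PySem.List.mem_sorted _ _ _ _).mpr hi), hperm.countP_eq]
  ring

-- the two search loops agree as long as the elements scanned come from lst
theorem pv_loops_eq (lst : List Int) (k : Int) :
    ∀ r : List Int, (∀ x ∈ r, x ∈ lst) → pvALoop lst k r = pvBLoop (pvRank lst) k r := by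
  intro r
  induction r with
  | nil => intro _; rfl
  | cons i rest ih =>
    intro hsub
    have hi : i ∈ lst := hsub i (List.mem_cons_self ..)
    simp only [pvALoop, pvBLoop, pv_count_foldl, pv_rank_eq_count lst i hi, zero_add]
    split
    · rfl
    · exact ih (fun x hx => hsub x (List.mem_cons_of_mem _ hx))

-- ===== VERDICT (by name: the statement is the Claim_ definition above) =====
theorem less_or_equal_spec : Claim_equal_less_or_equal := by
  intro lst k _ _
  unfold Spec_less_or_equal less_or_equal less_or_equal_alt
  split
  · rfl
  · exact pv_loops_eq lst k lst (fun x hx => hx)
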